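-- pv_equiv track=rewrite | github.com/Marnin-A/HunterPlus | utils/Utils.py | splitOnPeriods
-- ===== SOURCE A (Python) =====
-- def splitOnPeriods(string):
--     result = []
--     current_segment = []
--
--     for char in string:
--         if char.isspace():
--             break
--         elif char == '.':
--             if current_segment:
--                 result.append(''.join(current_segment))
--                 current_segment = []
--         else:
--             current_segment.append(char)
--
--     if current_segment:
--         result.append(''.join(current_segment))
--
--     return result
-- ===== SOURCE B (Python) =====
-- def splitOnPeriods(string):
--     boundary = len(string)
--     for i, ch in enumerate(string):
--         if ch.isspace():
--             boundary = i
--             break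
--     return [seg for seg in string[:boundary].split('.') if seg]
-- ===== Notes on version B (the rewrite author's own statement) =====
-- stated objective: simpler
-- what changed: B replaces A's interleaved per-character segment building with two plain passes: find the index of the first whitespace character, then split the prefix before it on '.' and drop empty segments.
import Mathlib
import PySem

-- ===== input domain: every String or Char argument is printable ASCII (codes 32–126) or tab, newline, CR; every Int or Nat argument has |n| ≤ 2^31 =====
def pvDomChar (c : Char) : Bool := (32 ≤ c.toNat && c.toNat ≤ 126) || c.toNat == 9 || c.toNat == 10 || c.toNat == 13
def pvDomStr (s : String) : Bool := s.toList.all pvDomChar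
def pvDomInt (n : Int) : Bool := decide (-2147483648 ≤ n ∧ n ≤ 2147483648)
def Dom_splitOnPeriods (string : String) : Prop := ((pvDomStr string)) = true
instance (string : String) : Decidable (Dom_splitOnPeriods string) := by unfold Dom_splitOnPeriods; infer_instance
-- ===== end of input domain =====

-- B finds the first-whitespace boundary, then splits the head on '.' and filters empty
-- segments — a plain split-and-filter decomposition instead of A's interleaved
-- per-character segment building (objective: simpler).


-- ===== PORT A =====
-- the for-loop with break: state = (result, current_segment); stopping at the first
-- whitespace char is the 'break'; ''.join(current_segment) is String.ofList.
def splitOnPeriodsLoopA : List Char → List String → List Char → List String × List Char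
  | [], res, cur => (res, cur)
  | c :: rest, res, cur =>
    if PySem.Chars.isspace c then (res, cur)
    else if c = '.' then
      if cur ≠ [] then splitOnPeriodsLoopA rest (res ++ [String.ofList cur]) []
      else splitOnPeriodsLoopA rest res cur
    else splitOnPeriodsLoopA rest res (cur ++ [c])

def splitOnPeriods (string : String) : List String :=
  let st := splitOnPeriodsLoopA string.toList [] []
  if st.2 ≠ [] then st.1 ++ [String.ofList st.2] else st.1

-- ===== PORT B =====
-- phase one of Source B: the enumerate-loop finding the index of the first whitespace char
def findWsIdx : List Char → Nat → Nat
  | [], n => n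
  | c :: rest, n => if PySem.Chars.isspace c then n else findWsIdx rest (n + 1)

-- phase two: string[:boundary] (0 ≤ boundary ≤ len, so the slice is List.take, exact),
-- .split('.') ported as the corresponding Lean library function List.splitOn on the
-- char list, and the '[seg for seg in … if seg]' filter-out of empty segments.
def splitOnPeriods_alt (string : String) : List String :=
  let boundary := findWsIdx string.toList 0
  let head := string.toList.take boundary
  ((List.splitOn '.' head).filter (fun seg => seg ≠ [])).map String.ofList

-- ===== PRECONDITION & SPEC =====
def Spec_splitOnPeriods (string : String) (out : List String) : Prop := out = splitOnPeriods_alt string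
instance (string : String) (out : List String) : Decidable (Spec_splitOnPeriods string out) := by unfold Spec_splitOnPeriods; infer_instance

-- ===== CLAIM (what is proved, stated in full; the proofs are below) =====
def Claim_equal_splitOnPeriods : Prop := ∀ (string : String), Dom_splitOnPeriods string → Spec_splitOnPeriods string (splitOnPeriods string)

-- ===== LEMMAS AND PROOFS =====

-- A's break makes the loop act only on the whitespace-free prefix
theorem loopA_takeWhile (l : List Char) (res : List String) (cur : List Char) :
    splitOnPeriodsLoopA l res cur
      = splitOnPeriodsLoopA (l.takeWhile (fun c => !PySem.Chars.isspace c)) res cur := by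
  induction l generalizing res cur with
  | nil => rfl
  | cons c rest ih =>
    by_cases hs : PySem.Chars.isspace c
    · simp [splitOnPeriodsLoopA, List.takeWhile_cons, hs]
    · have hdot : PySem.Chars.isspace '.' = false := by decide
      by_cases hd : c = '.'
      · by_cases hc : cur = []
        · simp [splitOnPeriodsLoopA, hs, hd, hc, hdot, ih]
        · simp [splitOnPeriodsLoopA, hs, hd, hc, hdot, ih]
      · simp [splitOnPeriodsLoopA, hs, hd, ih]

-- B's boundary index is the length of the whitespace-free prefix
theorem findWsIdx_eq (l : List Char) (n : Nat) :
    findWsIdx l n = n + (l.takeWhile (fun c => !PySem.Chars.isspace c)).length := by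
  induction l generalizing n with
  | nil => simp [findWsIdx]
  | cons c rest ih =>
    by_cases hs : PySem.Chars.isspace c
    · simp [findWsIdx, List.takeWhile_cons, hs]
    · simp [findWsIdx, List.takeWhile_cons, hs, ih]
      omega

theorem take_findWsIdx (l : List Char) :
    l.take (findWsIdx l 0) = l.takeWhile (fun c => !PySem.Chars.isspace c) := by
  rw [findWsIdx_eq, Nat.zero_add]
  exact (List.prefix_iff_eq_take.mp (List.takeWhile_prefix _)).symm

-- splitting a dot-free list on '.'
theorem splitOn_no_dot (l : List Char) (h : '.' ∉ l) : List.splitOn '.' l = [l] := by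
  induction l with
  | nil => rfl
  | cons c cs ih =>
    simp only [List.mem_cons, not_or] at h
    rw [List.splitOn, List.splitOnP_cons]
    have hc : (c == '.') = false := beq_eq_false_iff_ne.mpr (fun hh => h.1 hh.symm)
    simp only [hc, Bool.false_eq_true, if_false]
    have := ih h.2
    rw [List.splitOn] at this
    simp [this]

theorem splitOn_dot_append (cur rest : List Char) (h : '.' ∉ cur) :
    List.splitOn '.' (cur ++ '.' :: rest) = cur :: List.splitOn '.' rest := by
  induction cur with
  | nil => simp [List.splitOn, List.splitOnP_cons]
  | cons c cs ih =>
    simp only [List.mem_cons, not_or] at h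
    rw [List.cons_append, List.splitOn, List.splitOnP_cons]
    have hc : (c == '.') = false := beq_eq_false_iff_ne.mpr (fun hh => h.1 hh.symm)
    simp only [hc, Bool.false_eq_true, if_false]
    have := ih h.2
    rw [List.splitOn] at this
    simp [this]

-- main invariant: A's loop over a whitespace-free list computes B's split-and-filter
theorem loopA_invariant (l : List Char) (res : List String) (cur : List Char)
    (hl : ∀ c ∈ l, PySem.Chars.isspace c = false) (hcur : '.' ∉ cur) :
    (let st := splitOnPeriodsLoopA l res cur
     if st.2 ≠ [] then st.1 ++ [String.ofList st.2] else st.1)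
      = res ++ ((List.splitOn '.' (cur ++ l)).filter (fun seg => seg ≠ [])).map String.ofList := by
  induction l generalizing res cur with
  | nil =>
    simp only [splitOnPeriodsLoopA, List.append_nil]
    rw [splitOn_no_dot cur hcur]
    by_cases hc : cur = []
    · simp [hc]
    · simp [hc]
  | cons c rest ih =>
    have hs : PySem.Chars.isspace c = false := hl c (List.mem_cons_self ..)
    have hrest : ∀ x ∈ rest, PySem.Chars.isspace x = false :=
      fun x hx => hl x (List.mem_cons_of_mem _ hx)
    by_cases hd : c = '.'
    · subst hd
      rw [splitOn_dot_append cur rest hcur]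
      by_cases hc : cur = []
      · subst hc
        simp only [splitOnPeriodsLoopA, hs, Bool.false_eq_true, if_false, ne_eq,
          not_true_eq_false]
        have := ih res [] hrest (by simp)
        simpa using this
      · simp only [splitOnPeriodsLoopA, hs, Bool.false_eq_true, if_false, hc,
          ne_eq, if_pos, not_false_eq_true]
        have := ih (res ++ [String.ofList cur]) [] hrest (by simp)
        simp only [List.nil_append] at this
        rw [this]
        simp [hc]
    · have hcur' : '.' ∉ cur ++ [c] := by
        simp only [List.mem_append, List.mem_singleton, not_or]
        exact ⟨hcur, fun h => hd h.symm⟩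
      have := ih res (cur ++ [c]) hrest hcur'
      simp only [splitOnPeriodsLoopA, hs, Bool.false_eq_true, hd, if_neg,
        not_false_eq_true]
      rw [this, List.append_assoc]
      simp

-- ===== VERDICT (by name: the statement is the Claim_ definition above) =====
theorem splitOnPeriods_spec : Claim_equal_splitOnPeriods := by
  intro string _
  show splitOnPeriods string = splitOnPeriods_alt string
  simp only [splitOnPeriods, splitOnPeriods_alt]
  rw [take_findWsIdx, loopA_takeWhile]
  have := loopA_invariant (string.toList.takeWhile (fun c => !PySem.Chars.isspace c)) [] []
    (by intro c hc; have := List.mem_takeWhile_imp hc; simpa using this) (by simp)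
  simpa using this
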